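-- pv_equiv track=rewrite | github.com/Team-Ausdroid-Unimelb/justified-perspective-model-with-prediction | examples/grapevine/grapevine.py | get_os_dict
-- ===== SOURCE A (Python) =====
-- def get_os_dict(new_os,p):
--     os_dict = {}
--     for state in p:
--         for v_name in state.keys():
--             os_dict[v_name] = []
--
--     for state in new_os:
--         for v_name in os_dict.keys():
--             if v_name in state:
--                 os_dict[v_name].append(state[v_name])
--             else:
--                 os_dict[v_name].append(None)
--     return os_dict
-- ===== SOURCE B (Python) =====
-- def get_os_dict(new_os, p):
--     res = {}
--     for state in p:
--         for k in state:
--             res[k] = [None] * len(new_os)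
--     for i, state in enumerate(new_os):
--         for k in state:
--             if k in res:
--                 res[k][i] = state[k]
--     return res
-- ===== Notes on version B (the rewrite author's own statement) =====
-- stated objective: faster
-- what changed: B replaces A's dense column-wise build (for each state, append state-value-or-None to every known variable's list) by a sparse scatter: it preallocates an all-None row [None]*len(new_os) per variable, then writes only the entries actually present in each state at their enumerate index; absent (variable,state) pairs are never touched.
import Mathlib
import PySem

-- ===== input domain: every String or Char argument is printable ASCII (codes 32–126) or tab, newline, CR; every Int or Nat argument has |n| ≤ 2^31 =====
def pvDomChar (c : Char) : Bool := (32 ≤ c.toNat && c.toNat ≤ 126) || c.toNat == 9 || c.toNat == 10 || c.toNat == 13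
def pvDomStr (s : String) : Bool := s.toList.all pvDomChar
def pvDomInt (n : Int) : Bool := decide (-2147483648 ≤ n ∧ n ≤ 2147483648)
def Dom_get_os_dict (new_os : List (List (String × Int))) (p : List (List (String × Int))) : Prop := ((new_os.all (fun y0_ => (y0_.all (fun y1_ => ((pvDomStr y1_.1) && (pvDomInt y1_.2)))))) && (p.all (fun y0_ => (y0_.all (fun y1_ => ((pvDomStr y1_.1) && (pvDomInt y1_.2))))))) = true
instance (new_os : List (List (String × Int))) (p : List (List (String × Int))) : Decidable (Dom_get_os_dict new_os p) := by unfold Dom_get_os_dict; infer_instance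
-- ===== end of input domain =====

-- B replaces A's dense column-append (outer states, inner ALL variables, get-or-None) by a
-- sparse scatter: preallocate an all-None row of length len(new_os) per variable, then write
-- only the entries that are PRESENT in each state at their index; objective: alternative.

-- ===== PORT A =====
def get_os_dict (new_os : List (List (String × Int))) (p : List (List (String × Int))) : List (String × List (Option Int)) :=
  -- os_dict = {}; for state in p: for v_name in state.keys(): os_dict[v_name] = []
  let d0 : PySem.Dict String (List (Option Int)) :=
    p.foldl (fun d state => state.foldl (fun d kv => d.insert kv.1 ([] : List (Option Int))) d) PySem.Dict.empty
  -- for state in new_os: for v_name in os_dict.keys(): append state[v_name] / None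
  let d1 : PySem.Dict String (List (Option Int)) :=
    new_os.foldl (fun d state =>
      (PySem.Dict.keys d).foldl (fun d' v =>
        if (PySem.Dict.mk state).contains v then
          d'.insert v (d'.getD v [] ++ [(PySem.Dict.mk state).get? v])
        else
          d'.insert v (d'.getD v [] ++ [none])) d) d0
  d1.items

-- ===== PORT B =====
def get_os_dict_alt (new_os : List (List (String × Int))) (p : List (List (String × Int))) : List (String × List (Option Int)) :=
  -- res = {}; for state in p: for k in state: res[k] = [None] * len(new_os)
  let n : Nat := new_os.length
  let d0 : PySem.Dict String (List (Option Int)) :=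
    p.foldl (fun d state => state.foldl (fun d kv => d.insert kv.1 (List.replicate n (none : Option Int))) d) PySem.Dict.empty
  -- for i, state in enumerate(new_os): for k in state: if k in res: res[k][i] = state[k]
  -- ('for k in state' iterates the dict's DISTINCT keys in order = PySem.List.dedup of the key list;
  --  i ≥ 0 comes from enumerate, so .toNat is exact; 'res[k][i] = state[k]' is modify + List.set)
  let d1 : PySem.Dict String (List (Option Int)) :=
    (PySem.List.enumerate new_os).foldl (fun d is =>
      (PySem.List.dedup (is.2.map (fun kv => kv.1))).foldl (fun d k =>
        if d.contains k then
          d.modify k [] (fun l => l.set is.1.toNat ((PySem.Dict.mk is.2).get? k))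
        else d) d) d0
  d1.items

-- ===== PRECONDITION & SPEC =====
def Spec_get_os_dict (new_os : List (List (String × Int))) (p : List (List (String × Int))) (out : List (String × List (Option Int))) : Prop := out = get_os_dict_alt new_os p
instance (new_os : List (List (String × Int))) (p : List (List (String × Int))) (out : List (String × List (Option Int))) : Decidable (Spec_get_os_dict new_os p out) := by unfold Spec_get_os_dict; infer_instance

-- ===== CLAIM (what is proved, stated in full; the proofs are below) =====
def Claim_equal_get_os_dict : Prop := ∀ (new_os : List (List (String × Int))) (p : List (List (String × Int))), Dom_get_os_dict new_os p → Spec_get_os_dict new_os p (get_os_dict new_os p)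

-- ===== LEMMAS AND PROOFS =====

-- Shared phase 1: inserting a constant value c0 for every key of the flattened key list yields,
-- as items, exactly the ordered dedup of that key list paired with c0.
theorem pv_init_items (c0 : List (Option Int)) : ∀ (l : List String) (S : List String),
    ((l.foldl (fun d v => d.insert v c0)
        (PySem.Dict.mk (S.map (fun v => (v, c0)))))).items
      = (l.foldl PySem.Set.add S).map (fun v => (v, c0)) := by
  intro l
  induction l with
  | nil => intro S; simp
  | cons v l ih =>
    intro S
    simp only [List.foldl_cons]
    by_cases h : v ∈ S
    · have hc : (PySem.Dict.mk (S.map (fun v => (v, c0)))).contains v = true := by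
        simp [PySem.Dict.contains_mk, h]
      rw [show (PySem.Dict.mk (S.map (fun v => (v, c0)))).insert v c0
            = PySem.Dict.mk (S.map (fun v => (v, c0))) from ?_,
          show PySem.Set.add S v = S from ?_]
      · exact ih S
      · simp [PySem.Set.add, h]
      · apply PySem.Dict.ext
        rw [PySem.Dict.items_insert_of_contains _ _ hc]
        simp only [List.map_map]
        apply List.map_congr_left
        intro a _
        by_cases hav : a = v <;> simp [hav]
    · have hc : (PySem.Dict.mk (S.map (fun v => (v, c0)))).contains v = false := by
        simp [PySem.Dict.contains_mk]
        exact fun x hx e => h (e ▸ hx)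
      rw [show (PySem.Dict.mk (S.map (fun v => (v, c0)))).insert v c0
            = PySem.Dict.mk ((S ++ [v]).map (fun v => (v, c0))) from ?_,
          show PySem.Set.add S v = S ++ [v] from ?_]
      · exact ih (S ++ [v])
      · simp [PySem.Set.add, h]
      · apply PySem.Dict.ext
        rw [PySem.Dict.items_insert_of_not_contains _ _ hc]
        simp

-- Flattening the nested phase-1 loop.
theorem pv_flat (c0 : List (Option Int)) :
    ∀ (q : List (List (String × Int))) (d : PySem.Dict String (List (Option Int))),
    q.foldl (fun d state => state.foldl (fun d kv => d.insert kv.1 c0) d) d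
      = (q.flatMap (fun state => state.map (fun kv => kv.1))).foldl
          (fun d v => d.insert v c0) d := by
  intro q
  induction q with
  | nil => intro d; rfl
  | cons s qs ih =>
    intro d
    simp only [List.flatMap_cons, List.foldl_cons, List.foldl_append, List.foldl_map]
    exact ih _

-- Phase 1 as a dict literal over the deduped names.
theorem pv_phase1 (c0 : List (Option Int)) (q : List (List (String × Int))) :
    q.foldl (fun d state => state.foldl (fun d kv => d.insert kv.1 c0) d) PySem.Dict.empty
      = PySem.Dict.mk ((PySem.List.dedup (q.flatMap (fun state => state.map (fun kv => kv.1)))).map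
          (fun v => (v, c0))) := by
  apply PySem.Dict.ext
  rw [pv_flat]
  have he : PySem.Dict.empty = PySem.Dict.mk (([] : List String).map (fun v => (v, c0))) := rfl
  rw [he, pv_init_items]
  rw [PySem.List.dedup_eq_ofList, PySem.Set.ofList_eq_foldl]

-- One pass of A's inner keys-loop: updating every contained, pairwise-distinct key
-- appends c k to that key's value, pointwise on items.
theorem pv_update_items (c : String → Option Int) :
    ∀ (ks : List String) (d : PySem.Dict String (List (Option Int))),
    d.keys.Nodup → ks.Nodup → (∀ v ∈ ks, d.contains v = true) →
    (ks.foldl (fun d' v => d'.insert v (d'.getD v [] ++ [c v])) d).items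
      = d.items.map (fun kw => if kw.1 ∈ ks then (kw.1, kw.2 ++ [c kw.1]) else kw) := by
  intro ks
  induction ks with
  | nil => intro d _ _ _; simp
  | cons v ks ih =>
    intro d hnd hks hcont
    simp only [List.foldl_cons]
    have hcv : d.contains v = true := hcont v (by simp)
    have hitems : (d.insert v (d.getD v [] ++ [c v])).items
        = d.items.map (fun kw => if kw.1 ∈ [v] then (kw.1, kw.2 ++ [c kw.1]) else kw) := by
      rw [PySem.Dict.items_insert_of_contains _ _ hcv]
      apply List.map_congr_left
      intro kw hkw
      by_cases hk : kw.1 = v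
      · have hgd : d.getD kw.1 [] = kw.2 := PySem.Dict.getD_of_mem_items d hkw hnd []
        subst hk
        simp [hgd]
      · simp [hk]
    have hkeys : (d.insert v (d.getD v [] ++ [c v])).keys = d.keys :=
      PySem.Dict.keys_insert_of_contains _ _ hcv
    rw [ih (d.insert v (d.getD v [] ++ [c v])) (by rw [hkeys]; exact hnd)
          (List.Nodup.of_cons hks)
          (by intro w hw
              rw [PySem.Dict.contains_insert]
              simp only [Bool.or_eq_true, beq_iff_eq]
              exact Or.inr (hcont w (by simp [hw]))),
        hitems, List.map_map]
    apply List.map_congr_left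
    intro kw hkw
    have hvks : v ∉ ks := (List.nodup_cons.mp hks).1
    by_cases hk : kw.1 = v
    · simp [hk, hvks]
    · by_cases hmem : kw.1 ∈ ks <;> simp [hk, hmem]

-- Phase 2 of A: folding the state loop over a dict whose items are names.map (v, acc v)
-- extends each acc v by one lookup per state.
theorem pvA_phase2 (names : List String) (hn : names.Nodup) :
    ∀ (os : List (List (String × Int))) (acc : String → List (Option Int)),
    (os.foldl (fun d state =>
        (PySem.Dict.keys d).foldl (fun d' v =>
          if (PySem.Dict.mk state).contains v then
            d'.insert v (d'.getD v [] ++ [(PySem.Dict.mk state).get? v])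
          else
            d'.insert v (d'.getD v [] ++ [none])) d)
      (PySem.Dict.mk (names.map (fun v => (v, acc v))))).items
      = names.map (fun v => (v, acc v ++ os.map (fun state => (PySem.Dict.mk state).get? v))) := by
  intro os
  induction os with
  | nil => intro acc; simp
  | cons state os ih =>
    intro acc
    simp only [List.foldl_cons]
    have hfun : (fun (d' : PySem.Dict String (List (Option Int))) v =>
          if (PySem.Dict.mk state).contains v then
            d'.insert v (d'.getD v [] ++ [(PySem.Dict.mk state).get? v])
          else
            d'.insert v (d'.getD v [] ++ [none]))
        = (fun d' v => d'.insert v (d'.getD v [] ++ [(PySem.Dict.mk state).get? v])) := by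
      funext d' v
      by_cases h : (PySem.Dict.mk state).contains v = true
      · rw [if_pos h]
      · have hget : (PySem.Dict.mk state).get? v = none := by
          rw [PySem.Dict.get?_eq_none_iff_contains]
          rwa [Bool.not_eq_true] at h
        rw [if_neg h, hget]
    have hkeys : (PySem.Dict.mk (names.map (fun v => (v, acc v)))).keys = names := by
      simp [PySem.Dict.keys, Function.comp_def]
    have hstep : ((PySem.Dict.mk (names.map (fun v => (v, acc v)))).keys.foldl
          (fun d' v => d'.insert v (d'.getD v [] ++ [(PySem.Dict.mk state).get? v]))
          (PySem.Dict.mk (names.map (fun v => (v, acc v)))))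
        = PySem.Dict.mk (names.map (fun v => (v, acc v ++ [(PySem.Dict.mk state).get? v]))) := by
      apply PySem.Dict.ext
      rw [pv_update_items _ _ _ (by rw [hkeys]; exact hn) (by rw [hkeys]; exact hn)
            (by intro w hw
                rw [PySem.Dict.contains_iff_mem_keys, hkeys]
                rwa [hkeys] at hw)]
      simp only [List.map_map]
      apply List.map_congr_left
      intro a ha
      simp [hkeys, ha]
    rw [hfun, hstep, ih (fun v => acc v ++ [(PySem.Dict.mk state).get? v])]
    simp

-- One pass of B's inner scatter loop: a contains-guarded modify over pairwise-distinct keys,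
-- pointwise on items (keys absent from the dict are skipped by the guard).
theorem pv_scatter_items (g : String → List (Option Int) → List (Option Int)) :
    ∀ (ks : List String) (d : PySem.Dict String (List (Option Int))),
    d.keys.Nodup → ks.Nodup →
    (ks.foldl (fun d' k => if d'.contains k then d'.modify k [] (g k) else d') d).items
      = d.items.map (fun kw => if kw.1 ∈ ks then (kw.1, g kw.1 kw.2) else kw) := by
  intro ks
  induction ks with
  | nil => intro d _ _; simp
  | cons k ks ih =>
    intro d hnd hks
    simp only [List.foldl_cons]
    have hvks : k ∉ ks := (List.nodup_cons.mp hks).1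
    by_cases hck : d.contains k = true
    · rw [if_pos hck]
      -- d.modify k [] (g k) = d.insert k (g k (d.getD k []))  (definitional)
      have hmod : d.modify k [] (g k) = d.insert k (g k (d.getD k [])) := rfl
      have hitems : (d.modify k [] (g k)).items
          = d.items.map (fun kw => if kw.1 ∈ [k] then (kw.1, g kw.1 kw.2) else kw) := by
        rw [hmod, PySem.Dict.items_insert_of_contains _ _ hck]
        apply List.map_congr_left
        intro kw hkw
        by_cases hk : kw.1 = k
        · have hgd : d.getD kw.1 [] = kw.2 := PySem.Dict.getD_of_mem_items d hkw hnd []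
          subst hk
          simp [hgd]
        · simp [hk]
      have hkeys : (d.modify k [] (g k)).keys = d.keys := by
        rw [hmod]; exact PySem.Dict.keys_insert_of_contains _ _ hck
      rw [ih (d.modify k [] (g k)) (by rw [hkeys]; exact hnd) (List.Nodup.of_cons hks),
          hitems, List.map_map]
      apply List.map_congr_left
      intro kw hkw
      by_cases hk : kw.1 = k
      · simp [hk, hvks]
      · by_cases hmem : kw.1 ∈ ks <;> simp [hk, hmem]
    · rw [if_neg hck]
      rw [ih d hnd (List.Nodup.of_cons hks)]
      apply List.map_congr_left
      intro kw hkw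
      have hkne : kw.1 ≠ k := by
        intro e
        apply hck
        rw [PySem.Dict.contains_iff_mem_keys, ← e]
        exact PySem.Dict.mem_keys_of_mem_items d hkw
      by_cases hmem : kw.1 ∈ ks <;> simp [hkne, hmem]

-- Phase 2 of B: the enumerated scatter fold fills each preallocated None-row index by index.
theorem pvB_phase2 (names : List String) (hn : names.Nodup) :
    ∀ (os : List (List (String × Int))) (i0 : Int), 0 ≤ i0 →
    ∀ (acc : String → List (Option Int)), (∀ v, (acc v).length = i0.toNat) →
    ((PySem.List.enumerate os i0).foldl (fun d is =>
        (PySem.List.dedup (is.2.map (fun kv => kv.1))).foldl (fun d k =>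
          if d.contains k then
            d.modify k [] (fun l => l.set is.1.toNat ((PySem.Dict.mk is.2).get? k))
          else d) d)
      (PySem.Dict.mk (names.map (fun v => (v, acc v ++ List.replicate os.length none))))).items
      = names.map (fun v => (v, acc v ++ os.map (fun state => (PySem.Dict.mk state).get? v))) := by
  intro os
  induction os with
  | nil =>
    intro i0 _ acc _
    simp [PySem.List.enumerate]
  | cons state os ih =>
    intro i0 hi0 acc hlen
    rw [PySem.List.enumerate_cons]
    simp only [List.foldl_cons]
    have hkeys : (PySem.Dict.mk (names.map (fun v => (v, acc v ++ List.replicate (state :: os).length none)))).keys = names := by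
      simp [PySem.Dict.keys, Function.comp_def]
    have hstep : ((PySem.List.dedup (state.map (fun kv => kv.1))).foldl (fun d k =>
          if d.contains k then
            d.modify k [] (fun l => l.set i0.toNat ((PySem.Dict.mk state).get? k))
          else d)
          (PySem.Dict.mk (names.map (fun v => (v, acc v ++ List.replicate (state :: os).length none)))))
        = PySem.Dict.mk (names.map (fun v =>
            (v, (acc v ++ [(PySem.Dict.mk state).get? v]) ++ List.replicate os.length none))) := by
      apply PySem.Dict.ext
      rw [pv_scatter_items _ _ _ (by rw [hkeys]; exact hn)
            (by rw [PySem.List.dedup_eq_ofList]; exact PySem.Set.nodup_ofList _)]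
      simp only [List.map_map]
      apply List.map_congr_left
      intro v _
      by_cases hmem : v ∈ PySem.List.dedup (state.map (fun kv => kv.1))
      · -- v is a key of state: the set hits the first None of the tail
        simp only [Function.comp_apply, if_pos hmem]
        have hset : (acc v ++ List.replicate (os.length + 1) (none : Option Int)).set i0.toNat ((PySem.Dict.mk state).get? v)
            = acc v ++ (PySem.Dict.mk state).get? v :: List.replicate os.length none := by
          rw [List.set_append, if_neg (by rw [hlen v]; omega)]
          rw [hlen v, Nat.sub_self]
          simp [List.replicate_succ]
        simp [hset]
      · -- v not a key of state: untouched, and get? v = none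
        simp only [Function.comp_apply, if_neg hmem]
        have hget : (PySem.Dict.mk state).get? v = none := by
          rw [PySem.Dict.get?_eq_none_iff_not_mem_keys]
          intro hv
          apply hmem
          rw [PySem.List.dedup_eq_ofList, PySem.Set.mem_ofList]
          simpa [PySem.Dict.keys] using hv
        rw [hget]
        simp [List.replicate_succ, List.append_assoc]
    rw [hstep, ih (i0 + 1) (by omega)
          (fun v => acc v ++ [(PySem.Dict.mk state).get? v])
          (by intro v; simp [hlen v]; omega)]
    simp

theorem pv_main (new_os p : List (List (String × Int))) :
    get_os_dict new_os p = get_os_dict_alt new_os p := by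
  have hn : (PySem.List.dedup (p.flatMap (fun state => state.map (fun kv => kv.1)))).Nodup := by
    rw [PySem.List.dedup_eq_ofList]; exact PySem.Set.nodup_ofList _
  have hA := pvA_phase2 (PySem.List.dedup (p.flatMap (fun state => state.map (fun kv => kv.1)))) hn
      new_os (fun _ => ([] : List (Option Int)))
  have hB := pvB_phase2 (PySem.List.dedup (p.flatMap (fun state => state.map (fun kv => kv.1)))) hn
      new_os 0 (by omega) (fun _ => ([] : List (Option Int))) (by intro v; simp)
  simp only [List.nil_append] at hA hB
  simp only [get_os_dict, get_os_dict_alt]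
  rw [pv_phase1, pv_phase1]
  rw [hA, hB]

-- ===== VERDICT (by name: the statement is the Claim_ definition above) =====
theorem get_os_dict_spec : Claim_equal_get_os_dict := by
  intro new_os p _
  unfold Spec_get_os_dict
  exact pv_main new_os p
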